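-- pv_equiv track=rewrite | github.com/PennyLaneAI/pennylane | pennylane/qnode_new/jacobian.py | _best_method_combined
-- ===== SOURCE A (Python) =====
-- def _best_method_combined(methods, B_is_A=False):
--     """Combine partial derivative computation methods.
--
--     Given an Iterable of partial derivative computation methods, returns the best method
--     compatible with all of them.
--
--     Args:
--         methods (Iterable[str, None]): p.d. computation methods {None, 'F', 'V', 'B', 'A', '0'}
--         B_is_A (bool): iff True, subsume 'B' into 'A'
--
--     Returns:
--         str: p.d. computation method compatible with all the given ones
--     """
--     if None in methods:
--         return None  # one nondifferentiable item makes the whole nondifferentiable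
--     if 'F' in methods:
--         return 'F'   # ditto with items not supporting the par-shift method
--     if all(k == '0' for k in methods):
--         return '0'   # all the partial derivatives are zero
--     if 'V' in methods:
--         return 'V'   # variance par-shift method can also handle the B and A cases
--     if 'B' in methods:
--         return 'A' if B_is_A else 'B'  # observable-transforming par-shift method
--     return 'A'  # basic par-shift method
-- ===== SOURCE B (Python) =====
-- _RANK = {None: 5, 'F': 4, 'V': 3, 'B': 2, 'A': 1, '0': 0}
--
--
-- def _best_method_combined(methods, B_is_A=False):
--     best = '0'
--     for m in methods:
--         if _RANK.get(m, 1) > _RANK.get(best, 1):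
--             best = m
--     if best is None:
--         return None
--     if _RANK.get(best, 1) == 1:
--         return 'A'  # any basic/unknown method falls through to 'A'
--     if best == 'B' and B_is_A:
--         return 'A'
--     return best
-- ===== Notes on version B (the rewrite author's own statement) =====
-- stated objective: alternative
-- what changed: Replaced the chain of membership/all scans over the list by a precedence rank (None>F>V>B>A/unknown>0) and a single max-by-rank pass, with the winner mapped to the returned method.
import Mathlib
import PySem

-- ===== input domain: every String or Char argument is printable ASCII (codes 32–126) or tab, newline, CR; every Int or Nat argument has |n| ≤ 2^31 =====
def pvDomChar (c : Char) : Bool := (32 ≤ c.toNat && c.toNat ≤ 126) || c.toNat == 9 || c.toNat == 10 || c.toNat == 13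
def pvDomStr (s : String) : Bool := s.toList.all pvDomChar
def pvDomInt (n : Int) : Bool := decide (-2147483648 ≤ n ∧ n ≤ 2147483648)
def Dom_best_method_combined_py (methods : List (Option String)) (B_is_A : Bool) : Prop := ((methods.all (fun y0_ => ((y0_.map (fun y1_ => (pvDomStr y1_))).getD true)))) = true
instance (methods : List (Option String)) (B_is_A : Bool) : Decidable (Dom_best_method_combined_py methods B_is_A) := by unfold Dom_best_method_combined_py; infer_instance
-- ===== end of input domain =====

-- B replaces A's chain of membership/all scans by a precedence rank and one max-by-rank pass (objective: alternative).


-- ===== PORT A =====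
def best_method_combined_py (methods : List (Option String)) (B_is_A : Bool) : Option String :=
  if methods.contains none then none
  else if methods.contains (some "F") then some "F"
  else if methods.all (fun k => k == some "0") then some "0"
  else if methods.contains (some "V") then some "V"
  else if methods.contains (some "B") then (if B_is_A then some "A" else some "B")
  else some "A"

-- ===== PORT B =====
-- _RANK.get(m, 1) from Source B (dict lookup with default 1)
def pvRank (m : Option String) : Nat :=
  match m with
  | none => 5
  | some s => if s = "F" then 4 else if s = "V" then 3 else if s = "B" then 2
              else if s = "A" then 1 else if s = "0" then 0 else 1

-- the body of Source B's for-loop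
def pvStep (acc m : Option String) : Option String :=
  if pvRank acc < pvRank m then m else acc

def best_method_combined_py_alt (methods : List (Option String)) (B_is_A : Bool) : Option String :=
  let best := methods.foldl pvStep (some "0")
  if best = none then none
  else if pvRank best = 1 then some "A"
  else if best = some "B" ∧ B_is_A then some "A"
  else best

-- ===== PRECONDITION & SPEC =====
def Spec_best_method_combined_py (methods : List (Option String)) (B_is_A : Bool) (out : Option String) : Prop := out = best_method_combined_py_alt methods B_is_A
instance (methods : List (Option String)) (B_is_A : Bool) (out : Option String) : Decidable (Spec_best_method_combined_py methods B_is_A out) := by unfold Spec_best_method_combined_py; infer_instance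

-- ===== CLAIM (what is proved, stated in full; the proofs are below) =====
def Claim_equal_best_method_combined_py : Prop := ∀ (methods : List (Option String)) (B_is_A : Bool), Dom_best_method_combined_py methods B_is_A → Spec_best_method_combined_py methods B_is_A (best_method_combined_py methods B_is_A)

-- ===== LEMMAS AND PROOFS =====

lemma pvRank_le5 (m : Option String) : pvRank m ≤ 5 := by
  cases m with
  | none => simp [pvRank]
  | some s => simp only [pvRank]; split_ifs <;> omega

lemma pvRank_eq5 (m : Option String) (h : pvRank m = 5) : m = none := by
  cases m with
  | none => rfl
  | some s => simp only [pvRank] at h; split_ifs at h <;> omega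

lemma pvRank_eq4 (m : Option String) (h : pvRank m = 4) : m = some "F" := by
  cases m with
  | none => simp [pvRank] at h
  | some s => simp only [pvRank] at h; split_ifs at h with h1 <;> first | (subst h1; rfl) | omega

lemma pvRank_eq3 (m : Option String) (h : pvRank m = 3) : m = some "V" := by
  cases m with
  | none => simp [pvRank] at h
  | some s =>
    simp only [pvRank] at h
    split_ifs at h with h1 h2 <;> first | (subst h2; rfl) | omega

lemma pvRank_eq2 (m : Option String) (h : pvRank m = 2) : m = some "B" := by
  cases m with
  | none => simp [pvRank] at h
  | some s =>
    simp only [pvRank] at h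
    split_ifs at h with h1 h2 h3 <;> first | (subst h3; rfl) | omega

lemma pvRank_eq0 (m : Option String) (h : pvRank m = 0) : m = some "0" := by
  cases m with
  | none => simp [pvRank] at h
  | some s =>
    simp only [pvRank] at h
    split_ifs at h with h1 h2 h3 h4 h5 <;> first | (subst h5; rfl) | omega

lemma pvRank_step (acc m : Option String) : pvRank (pvStep acc m) = max (pvRank acc) (pvRank m) := by
  unfold pvStep; split <;> omega

-- the fold's result is the accumulator or an element of the list
lemma pvFold_mem (l : List (Option String)) : ∀ acc : Option String,
    l.foldl pvStep acc = acc ∨ l.foldl pvStep acc ∈ l := by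
  induction l with
  | nil => intro acc; left; rfl
  | cons x xs ih =>
    intro acc
    rcases ih (pvStep acc x) with h | h
    · rw [List.foldl_cons, h]
      unfold pvStep; split
      · right; exact List.mem_cons_self
      · left; rfl
    · right; exact List.mem_cons_of_mem _ h

-- the fold's rank is the running max of ranks
lemma pvFold_rank (l : List (Option String)) : ∀ acc : Option String,
    pvRank (l.foldl pvStep acc) = l.foldl (fun a m => max a (pvRank m)) (pvRank acc) := by
  induction l with
  | nil => intro acc; rfl
  | cons x xs ih =>
    intro acc
    rw [List.foldl_cons, List.foldl_cons, ih, pvRank_step]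

-- every element's rank is bounded by the max-fold
-- the accumulator is bounded by the max-fold
lemma pvMax_acc (l : List (Option String)) : ∀ a : Nat,
    a ≤ l.foldl (fun a m => max a (pvRank m)) a := by
  induction l with
  | nil => intro a; simp
  | cons x xs ih =>
    intro a
    rw [List.foldl_cons]
    exact le_trans (le_max_left _ _) (ih _)

-- every element's rank is bounded by the max-fold
lemma pvMax_bound (l : List (Option String)) : ∀ a : Nat, ∀ m ∈ l,
    pvRank m ≤ l.foldl (fun a m => max a (pvRank m)) a := by
  induction l with
  | nil => intro a m hm; cases hm
  | cons x xs ih =>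
    intro a m hm
    rw [List.foldl_cons]
    rcases List.mem_cons.mp hm with h | h
    · subst h
      exact le_trans (le_max_right _ _) (pvMax_acc xs _)
    · exact ih _ m h

-- A's result, characterised by any max-by-rank element `best` of the list
lemma pv_core (methods : List (Option String)) (B_is_A : Bool) (best : Option String)
    (hmem : best = some "0" ∨ best ∈ methods)
    (hub : ∀ m ∈ methods, pvRank m ≤ pvRank best)
    (M : Nat) (hM : pvRank best = M) :
    best_method_combined_py methods B_is_A =
      (if best = none then none
       else if pvRank best = 1 then some "A"
       else if best = some "B" ∧ B_is_A then some "A"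
       else best) := by
  have hM5 : M ≤ 5 := hM ▸ pvRank_le5 best
  unfold best_method_combined_py
  interval_cases M
  · -- M = 0 : best = some "0", every element is some "0"
    have hb0 : best = some "0" := pvRank_eq0 best hM
    have hall : methods.all (fun k => k == some "0") = true := by
      simp only [List.all_eq_true, beq_iff_eq]
      intro k hk
      exact pvRank_eq0 k (Nat.le_zero.mp (hM ▸ hub k hk))
    have hnone : ¬ (none ∈ methods) := by
      intro h; have := hub none h; rw [hM] at this; simp [pvRank] at this
    have hF : ¬ (some "F" ∈ methods) := by
      intro h; have := hub _ h; rw [hM] at this; simp [pvRank] at this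
    simp [hb0, pvRank, hnone, hF, hall]
  · -- M = 1 : best has rank 1, B returns "A"; A has no none/F/V/B, not all "0"
    have hnone : ¬ (none ∈ methods) := by
      intro h; have := hub none h; rw [hM] at this; simp [pvRank] at this
    have hF : ¬ (some "F" ∈ methods) := by
      intro h; have := hub _ h; rw [hM] at this; simp [pvRank] at this
    have hV : ¬ (some "V" ∈ methods) := by
      intro h; have := hub _ h; rw [hM] at this; simp [pvRank] at this
    have hB : ¬ (some "B" ∈ methods) := by
      intro h; have := hub _ h; rw [hM] at this; simp [pvRank] at this
    have hbne : best ≠ none := by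
      intro h; rw [h] at hM; simp [pvRank] at hM
    have hnotall : ¬ (methods.all (fun k => k == some "0") = true) := by
      rcases hmem with h | h
      · rw [h] at hM; simp [pvRank] at hM
      · intro hall
        simp only [List.all_eq_true, beq_iff_eq] at hall
        rw [hall best h] at hM; simp [pvRank] at hM
    simp [hnone, hF, hV, hB, hnotall, hbne, hM]
  · -- M = 2 : best = some "B", "B" ∈ methods; no none/F/V; not all "0"
    have hb : best = some "B" := pvRank_eq2 best hM
    have hBmem : some "B" ∈ methods := by
      rcases hmem with h | h
      · rw [h] at hb; exact absurd hb (by decide)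
      · exact hb ▸ h
    have hnone : ¬ (none ∈ methods) := by
      intro h; have := hub none h; rw [hM] at this; simp [pvRank] at this
    have hF : ¬ (some "F" ∈ methods) := by
      intro h; have := hub _ h; rw [hM] at this; simp [pvRank] at this
    have hV : ¬ (some "V" ∈ methods) := by
      intro h; have := hub _ h; rw [hM] at this; simp [pvRank] at this
    have hnotall : ¬ (methods.all (fun k => k == some "0") = true) := by
      intro hall
      simp only [List.all_eq_true, beq_iff_eq] at hall
      exact absurd (hall _ hBmem) (by decide)
    cases B_is_A <;> simp [hb, pvRank, hnone, hF, hV, hBmem, hnotall]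
  · -- M = 3 : best = some "V"
    have hb : best = some "V" := pvRank_eq3 best hM
    have hVmem : some "V" ∈ methods := by
      rcases hmem with h | h
      · rw [h] at hb; exact absurd hb (by decide)
      · exact hb ▸ h
    have hnone : ¬ (none ∈ methods) := by
      intro h; have := hub none h; rw [hM] at this; simp [pvRank] at this
    have hF : ¬ (some "F" ∈ methods) := by
      intro h; have := hub _ h; rw [hM] at this; simp [pvRank] at this
    have hnotall : ¬ (methods.all (fun k => k == some "0") = true) := by
      intro hall
      simp only [List.all_eq_true, beq_iff_eq] at hall
      exact absurd (hall _ hVmem) (by decide)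
    simp [hb, pvRank, hnone, hF, hVmem, hnotall]
  · -- M = 4 : best = some "F"
    have hb : best = some "F" := pvRank_eq4 best hM
    have hFmem : some "F" ∈ methods := by
      rcases hmem with h | h
      · rw [h] at hb; exact absurd hb (by decide)
      · exact hb ▸ h
    have hnone : ¬ (none ∈ methods) := by
      intro h; have := hub none h; rw [hM] at this; simp [pvRank] at this
    simp [hb, pvRank, hnone, hFmem]
  · -- M = 5 : best = none
    have hb : best = none := pvRank_eq5 best hM
    have hnmem : (none : Option String) ∈ methods := by
      rcases hmem with h | h
      · rw [h] at hb; exact absurd hb (by decide)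
      · exact hb ▸ h
    simp [hb, hnmem]

theorem pv_main (methods : List (Option String)) (B_is_A : Bool) :
    best_method_combined_py methods B_is_A = best_method_combined_py_alt methods B_is_A := by
  have hub : ∀ m ∈ methods, pvRank m ≤ pvRank (methods.foldl pvStep (some "0")) := by
    intro m hm
    rw [pvFold_rank]
    exact pvMax_bound methods _ m hm
  exact pv_core methods B_is_A (methods.foldl pvStep (some "0"))
    (pvFold_mem methods (some "0")) hub (pvRank (methods.foldl pvStep (some "0"))) rfl

-- ===== VERDICT (by name: the statement is the Claim_ definition above) =====
theorem best_method_combined_py_spec : Claim_equal_best_method_combined_py := by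
  intro methods B_is_A _
  unfold Spec_best_method_combined_py
  exact pv_main methods B_is_A
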